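-- pv_equiv track=rewrite | github.com/integralslayerinpy/Electronics | 2021labs4PY/lab5_2021.py | problem10
-- ===== SOURCE A (Python) =====
-- def problem10(inte):
--     inte.sort()
--     mtd=[j for j in range(inte[0],inte[-1]+1) if j not in inte  ]
--     mpt=[j for j in range(inte[0],inte[-1]+1) if j in inte]
--     for i in mtd:
--             return i
--     for k in mpt:
--         return inte[-1] +1
-- ===== SOURCE B (Python) =====
-- # B: sort the distinct values once and scan for the first gap (O(n log n) vs A's O(R*n)).
-- # A sorts its argument in place; the equivalence claimed is about the return value only.
-- def problem10(inte):
--     vals = sorted(set(inte))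
--     cur = vals[0]
--     for v in vals:
--         if v != cur:
--             return cur
--         cur = v + 1
--     return cur
-- ===== Notes on version B (the rewrite author's own statement) =====
-- stated objective: faster
-- what changed: Instead of materialising every value of range(min,max+1) and testing each for list membership, B sorts the distinct elements once and scans adjacent values for the first gap, returning early.
import Mathlib
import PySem

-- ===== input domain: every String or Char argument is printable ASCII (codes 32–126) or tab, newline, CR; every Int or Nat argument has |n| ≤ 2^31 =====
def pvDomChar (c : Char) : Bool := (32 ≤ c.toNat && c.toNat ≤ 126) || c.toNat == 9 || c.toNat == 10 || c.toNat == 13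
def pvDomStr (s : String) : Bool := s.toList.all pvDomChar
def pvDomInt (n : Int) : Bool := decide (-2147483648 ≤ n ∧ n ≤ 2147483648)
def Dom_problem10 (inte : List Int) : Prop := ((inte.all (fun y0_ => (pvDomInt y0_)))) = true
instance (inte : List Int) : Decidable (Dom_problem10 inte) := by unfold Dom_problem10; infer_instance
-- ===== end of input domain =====

-- B sorts the distinct values once and scans for the first gap instead of testing every value of
-- range(min, max+1) for list membership; A sorts its argument in place, the claim is about the return value only.

-- ===== PORT A =====
def problem10 (inte : List Int) : Int :=
  let s := PySem.List.sorted inte (fun x => x) false      -- inte.sort()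
  let lo := (PySem.List.pyGet? s 0).getD 0                -- inte[0]; none = IndexError, excluded by Pre_
  let hi := (PySem.List.pyGet? s (-1)).getD 0             -- inte[-1]
  let rng := PySem.List.pyRange lo (hi + 1) 1
  let mtd := rng.filter (fun j => decide (j ∉ s))
  let mpt := rng.filter (fun j => decide (j ∈ s))
  match mtd with
  | i :: _ => i
  | [] =>
    match mpt with
    | _ :: _ => hi + 1
    | [] => 0                                             -- Python falls through returning None; unreachable when inte ≠ []

-- ===== PORT B =====
def p10go : List Int → Int → Int
  | [], cur => cur
  | v :: rest, cur => if v ≠ cur then cur else p10go rest (v + 1)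

def problem10_alt (inte : List Int) : Int :=
  let vals := PySem.List.sorted (PySem.Set.ofList inte) (fun x => x) false   -- sorted(set(inte))
  match vals with
  | [] => 0                                               -- vals[0] raises IndexError; excluded by Pre_
  | v0 :: _ => p10go vals v0

-- ===== PRECONDITION & SPEC =====
-- A evaluates inte[0] and raises IndexError on the empty list (B likewise); Pre_ excludes exactly that.
def Pre_problem10 (inte : List Int) : Prop := inte ≠ []
instance (inte : List Int) : Decidable (Pre_problem10 inte) := by unfold Pre_problem10; infer_instance
def pvWitness_problem10 : List Int := ([3, 1, 2, 5])
def Spec_problem10 (inte : List Int) (out : Int) : Prop := out = problem10_alt inte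
instance (inte : List Int) (out : Int) : Decidable (Spec_problem10 inte out) := by unfold Spec_problem10; infer_instance

-- ===== CLAIM (what is proved, stated in full; the proofs are below) =====
def Claim_equal_problem10 : Prop := ∀ (inte : List Int), Dom_problem10 inte → Pre_problem10 inte → Spec_problem10 inte (problem10 inte)

-- ===== LEMMAS AND PROOFS =====

-- every element of a (≤)-pairwise list is bounded by its last element
lemma le_getLast_of_pairwise (s : List Int) (hp : s.Pairwise (· ≤ ·)) :
    ∀ y ∈ s, ∀ h : s ≠ [], y ≤ s.getLast h := by
  induction s with
  | nil => intro y hy; cases hy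
  | cons a t ih =>
    intro y hy h
    rcases List.pairwise_cons.mp hp with ⟨ha, ht⟩
    cases t with
    | nil => simp at hy; simp [hy, List.getLast]
    | cons b u =>
      rw [List.getLast_cons (by simp)]
      rcases List.mem_cons.mp hy with rfl | hy
      · exact le_trans (ha b (by simp)) (ih ht b (by simp) (by simp))
      · exact ih ht y hy (by simp)

-- the first element of range(cur, hi+1) missing from a strictly increasing vals ⊆ [cur,hi]
-- (default hi+1 when none is missing) is what B's scan computes
lemma go_eq : ∀ (vals : List Int) (cur hi : Int), vals.Pairwise (· < ·) →
    (∀ v ∈ vals, cur ≤ v ∧ v ≤ hi) → cur ≤ hi + 1 →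
    (((PySem.List.pyRange cur (hi + 1) 1).filter (fun j => decide (j ∉ vals))).headD (hi + 1))
      = p10go vals cur := by
  intro vals
  induction vals with
  | nil =>
    intro cur hi _ _ hle
    by_cases h : cur ≤ hi
    · rw [PySem.List.pyRange_one_cons (by omega)]; simp [p10go]
    · rw [PySem.List.pyRange_one_eq_nil (by omega)]
      simp [p10go]; omega
  | cons v rest ih =>
    intro cur hi hp hb hle
    rcases List.pairwise_cons.mp hp with ⟨hv, hrest⟩
    obtain ⟨hcv, hvhi⟩ := hb v (by simp)
    rcases eq_or_lt_of_le hcv with rfl | hlt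
    · -- head of vals equals cur: drop it from the range and recurse
      rw [PySem.List.pyRange_one_cons (by omega)]
      rw [List.filter_cons_of_neg (by simp)]
      have hfeq : (PySem.List.pyRange (cur + 1) (hi + 1) 1).filter (fun j => decide (j ∉ cur :: rest))
          = (PySem.List.pyRange (cur + 1) (hi + 1) 1).filter (fun j => decide (j ∉ rest)) := by
        apply List.filter_congr
        intro j hj
        rw [PySem.List.mem_pyRange_one] at hj
        simp only [List.mem_cons, decide_eq_decide]
        constructor
        · intro h hj2; exact h (Or.inr hj2)
        · intro h hj2; rcases hj2 with rfl | hj2; omega; exact h hj2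
      rw [hfeq, ih (cur + 1) hi hrest
        (fun w hw => ⟨by have := hv w hw; omega, (hb w (by simp [hw])).2⟩) (by omega)]
      simp [p10go]
    · -- cur itself is missing from vals: it is the first element of mtd, and B's scan stops at cur
      have hcur_notmem : cur ∉ v :: rest := by
        intro hc
        rcases List.mem_cons.mp hc with rfl | hc
        · omega
        · have := hv cur hc; omega
      rw [PySem.List.pyRange_one_cons (by omega),
        List.filter_cons_of_pos (by simpa using hcur_notmem)]
      have hvne : v ≠ cur := by omega
      simp [p10go, hvne]

-- ===== VERDICT (by name: the statement is the Claim_ definition above) =====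
theorem problem10_spec : Claim_equal_problem10 := by
  intro inte _ hpre
  unfold Spec_problem10 problem10 problem10_alt
  dsimp only
  set s := PySem.List.sorted inte (fun x => x) false with hs
  have hsne : s ≠ [] := by
    rw [hs]; simpa [PySem.List.sorted_eq_nil_iff] using hpre
  obtain ⟨m, t, hms⟩ : ∃ m t, s = m :: t := by
    cases hcase : s with
    | nil => exact absurd hcase hsne
    | cons a b => exact ⟨a, b, rfl⟩
  have hmem_s : ∀ y, y ∈ s ↔ y ∈ inte := fun y => PySem.List.mem_sorted inte (fun x => x) false y
  have hlo : (PySem.List.pyGet? s 0).getD 0 = m := by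
    rw [hms, PySem.List.pyGet?_zero_cons]; rfl
  have hhi : (PySem.List.pyGet? s (-1)).getD 0 = s.getLast hsne := by
    rw [PySem.List.pyGet?_neg_one, List.getLast?_eq_some_getLast hsne]; rfl
  set hi := s.getLast hsne with hhidef
  have hmin : ∀ y ∈ inte, m ≤ y :=
    PySem.List.key_head_sorted_le inte (fun x => x) (hs.symm.trans hms)
  have hpw : s.Pairwise (· ≤ ·) := by
    have h := PySem.List.sorted_pairwise inte (fun x => x)
    rwa [← hs] at h
  have hmax : ∀ y ∈ s, y ≤ hi := fun y hy => le_getLast_of_pairwise s hpw y hy hsne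
  have hm_mem : m ∈ s := by rw [hms]; simp
  have hmhi : m ≤ hi := hmax m hm_mem
  set vals := PySem.List.sorted (PySem.Set.ofList inte) (fun x => x) false with hvals
  have hmem_vals : ∀ y, y ∈ vals ↔ y ∈ inte := by
    intro y
    rw [hvals, PySem.List.mem_sorted, PySem.Set.mem_ofList]
  have hvalsne : vals ≠ [] := by
    intro hnil
    have h := (hmem_vals m).mpr ((hmem_s m).mp hm_mem)
    rw [hnil] at h; cases h
  obtain ⟨w, ws, hws⟩ : ∃ w ws, vals = w :: ws := by
    cases hcase : vals with
    | nil => exact absurd hcase hvalsne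
    | cons a b => exact ⟨a, b, rfl⟩
  have hvpw : vals.Pairwise (· < ·) := by
    have h := PySem.List.sorted_ofList_pairwise_lt (xs := inte)
    rwa [← hvals] at h
  have hwm : w = m := by
    have h1 : m ≤ w := hmin w ((hmem_vals w).mp (by rw [hws]; simp))
    have h2 : w ≤ m := PySem.List.key_head_sorted_le (PySem.Set.ofList inte) (fun x => x)
      (hvals.symm.trans hws) m (by rw [PySem.Set.mem_ofList]; exact (hmem_s m).mp hm_mem)
    omega
  have hfeq : (PySem.List.pyRange m (hi + 1) 1).filter (fun j => decide (j ∉ s))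
      = (PySem.List.pyRange m (hi + 1) 1).filter (fun j => decide (j ∉ vals)) := by
    apply List.filter_congr
    intro j _
    simp only [hmem_s, hmem_vals]
  have hkey := go_eq vals m hi hvpw
    (fun v hv => ⟨hmin v ((hmem_vals v).mp hv), hmax v ((hmem_s v).mpr ((hmem_vals v).mp hv))⟩)
    (by omega)
  have hmpt_ne : (PySem.List.pyRange m (hi + 1) 1).filter (fun j => decide (j ∈ s)) ≠ [] := by
    have hm_rng : m ∈ PySem.List.pyRange m (hi + 1) 1 := by
      rw [PySem.List.mem_pyRange_one]; omega
    intro hnil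
    have h : m ∈ (PySem.List.pyRange m (hi + 1) 1).filter (fun j => decide (j ∈ s)) := by
      rw [List.mem_filter]; exact ⟨hm_rng, by simpa using hm_mem⟩
    rw [hnil] at h; cases h
  rw [hlo, hhi, hfeq, hws, hwm]
  rw [hws, hwm] at hkey
  cases hmtd : (PySem.List.pyRange m (hi + 1) 1).filter (fun j => decide (j ∉ m :: ws)) with
  | cons i rest =>
    rw [hmtd] at hkey
    simpa using hkey
  | nil =>
    rw [hmtd] at hkey
    simp only [List.headD_nil] at hkey
    cases hmpt : (PySem.List.pyRange m (hi + 1) 1).filter (fun j => decide (j ∈ s)) with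
    | nil => exact absurd hmpt hmpt_ne
    | cons a b => simpa using hkey
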